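-- pv_equiv track=rewrite | github.com/deepakjon31/pythonPractice | deepest_pit.py | recursiveDec
-- ===== SOURCE A (Python) =====
-- def recursiveDec(c, A):
--     l = len(A)
--     if c < l-1:
--         if A[c] > A[c+1]:
--             return  c
--         else:
--             return recursiveDec(c+1, A)
--     else:
--         return c
-- ===== SOURCE B (Python) =====
-- def recursiveDec(c, A):
--     l = len(A)
--     if c >= l - 1:
--         return c
--     return next((i for i in range(c, l - 1) if A[i] > A[i + 1]), l - 1)
-- ===== Notes on version B (the rewrite author's own statement) =====
-- stated objective: idiomatic
-- what changed: Replaces A's self-recursion by a single next() over a generator scanning range(c, l-1) for the first adjacent decrease, with l-1 as the default.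
import Mathlib
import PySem

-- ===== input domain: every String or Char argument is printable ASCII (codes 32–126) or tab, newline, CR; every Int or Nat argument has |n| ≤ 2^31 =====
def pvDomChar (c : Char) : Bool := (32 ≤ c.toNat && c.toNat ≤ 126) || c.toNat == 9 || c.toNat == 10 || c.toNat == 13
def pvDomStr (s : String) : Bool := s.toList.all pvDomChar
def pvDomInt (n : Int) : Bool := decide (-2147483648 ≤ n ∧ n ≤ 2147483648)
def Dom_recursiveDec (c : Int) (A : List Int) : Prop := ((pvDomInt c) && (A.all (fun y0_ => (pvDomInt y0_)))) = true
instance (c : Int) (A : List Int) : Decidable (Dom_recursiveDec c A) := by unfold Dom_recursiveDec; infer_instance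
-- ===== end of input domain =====

-- B replaces A's self-recursion by a single generator search over range(c, l-1) with
-- a default (objective: idiomatic, same cost); return value equivalence on Pre_.

-- ===== PORT A =====
def recursiveDec (c : Int) (A : List Int) : Int :=
  let l : Int := A.length
  if c < l - 1 then
    match PySem.List.pyGet? A c, PySem.List.pyGet? A (c + 1) with
    | some x, some y => if x > y then c else recursiveDec (c + 1) A
    | _, _ => 0  -- IndexError in Python; excluded by Pre_recursiveDec
  else c
termination_by ((A.length : Int) - c).toNat
decreasing_by omega

-- ===== PORT B =====
def recursiveDec_alt (c : Int) (A : List Int) : Int :=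
  let l : Int := A.length
  if c ≥ l - 1 then c
  else
    -- A[i] > A[i+1]: exact under Pre_recursiveDec (both indices in range there)
    ((PySem.List.pyRange c (l - 1) 1).find? (fun i =>
      decide (PySem.List.pyGetD A i 0 > PySem.List.pyGetD A (i + 1) 0))).getD (l - 1)

-- ===== PRECONDITION & SPEC =====
-- Pre_ excludes exactly the inputs where Python A raises IndexError (c below -len(A) while c < len(A)-1).
def Pre_recursiveDec (c : Int) (A : List Int) : Prop :=
  ¬ (c < (A.length : Int) - 1 ∧ c < -(A.length : Int))
instance (c : Int) (A : List Int) : Decidable (Pre_recursiveDec c A) := by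
  unfold Pre_recursiveDec; infer_instance
def pvWitness_recursiveDec : Int × List Int := (0, [3, 1, 2])
def Spec_recursiveDec (c : Int) (A : List Int) (out : Int) : Prop := out = recursiveDec_alt c A
instance (c : Int) (A : List Int) (out : Int) : Decidable (Spec_recursiveDec c A out) := by unfold Spec_recursiveDec; infer_instance

-- ===== CLAIM (what is proved, stated in full; the proofs are below) =====
def Claim_equal_recursiveDec : Prop := ∀ (c : Int) (A : List Int), Dom_recursiveDec c A → Pre_recursiveDec c A → Spec_recursiveDec c A (recursiveDec c A)

-- ===== LEMMAS AND PROOFS =====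

theorem recursiveDec_eq_alt (A : List Int) (c : Int)
    (h : Pre_recursiveDec c A) : recursiveDec c A = recursiveDec_alt c A := by
  unfold Pre_recursiveDec at h
  by_cases hc : c < (A.length : Int) - 1
  · -- A takes the recursive branch; both indices are in range
    have hcge : -(A.length : Int) ≤ c := by omega
    obtain ⟨x, hx⟩ : ∃ x, PySem.List.pyGet? A c = some x := by
      rcases hg : PySem.List.pyGet? A c with _ | x
      · rw [PySem.List.pyGet?_eq_none_iff] at hg
        exact absurd ⟨hcge, by omega⟩ hg
      · exact ⟨x, rfl⟩
    obtain ⟨y, hy⟩ : ∃ y, PySem.List.pyGet? A (c + 1) = some y := by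
      rcases hg : PySem.List.pyGet? A (c + 1) with _ | y
      · rw [PySem.List.pyGet?_eq_none_iff] at hg
        exact absurd ⟨by omega, by omega⟩ hg
      · exact ⟨y, rfl⟩
    rw [recursiveDec]
    simp only [hx, hy, if_pos hc]
    unfold recursiveDec_alt
    simp only [if_neg (by omega : ¬ c ≥ (A.length : Int) - 1)]
    rw [PySem.List.pyRange_one_cons hc, List.find?_cons]
    have hdx : PySem.List.pyGetD A c 0 = x := by simp [PySem.List.pyGetD, hx]
    have hdy : PySem.List.pyGetD A (c + 1) 0 = y := by simp [PySem.List.pyGetD, hy]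
    simp only [hdx, hdy]
    by_cases hxy : x > y
    · simp [hxy]
    · rw [if_neg hxy, decide_eq_false hxy]
      simp only []
      have ih := recursiveDec_eq_alt A (c + 1) (by unfold Pre_recursiveDec; omega)
      rw [ih]
      unfold recursiveDec_alt
      by_cases hc1 : c + 1 ≥ (A.length : Int) - 1
      · -- tail range is empty; the default l-1 equals c+1
        simp only [if_pos hc1]
        rw [PySem.List.pyRange_one_eq_nil (by omega)]
        simp; omega
      · simp only [if_neg hc1]
  · -- both return c
    rw [recursiveDec]
    unfold recursiveDec_alt
    simp only [if_neg hc, if_pos (by omega : c ≥ (A.length : Int) - 1)]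
termination_by ((A.length : Int) - c).toNat
decreasing_by omega

-- ===== VERDICT (by name: the statement is the Claim_ definition above) =====
theorem recursiveDec_spec : Claim_equal_recursiveDec := by
  intro c A _ hpre
  unfold Spec_recursiveDec
  exact recursiveDec_eq_alt A c hpre
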